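-- pv_equiv track=rewrite | github.com/danielgaylord/coding-exercises | Advent of Code/2021-Day10.py | syntax_scoring
-- ===== SOURCE A (Python) =====
-- def syntax_scoring(chunks):
--     matches = {"(": ")", "[": "]", "{": "}", "<": ">"}
--     open = "([{<"
--     incomplete = []
--
--     # Part 1: For each char in each chunk, if it's an opening bracket add to stack
--     # otherwise, pop last opening braket and check if it matches the closing one
--     # if not, add to score and fuhgeddaboudit
--     points = {")": 3, "]": 57, "}": 1197, ">": 25137}
--     corrupt_score = 0
--     for chunk in chunks:
--         chars = []
--         corrupt = False
--         for char in chunk: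
--             if char in open:
--                 chars.append(char)
--             else:
--                 check = chars.pop()
--                 if matches[check] != char:
--                     corrupt_score += points[char]
--                     corrupt = True
--         # Part 2 addendum, to make sure we can look at incomplete lines, remaining
--         # chars of incomplete lines to a list
--         if not corrupt:
--             incomplete.append(chars)
--
--     # Part 2: For each incomplete line, go through chars in reverse order to
--     # calculate the scores and to a list, finally sort the list and find the
--     # middle element
--     points = {")": 1, "]": 2, "}": 3, ">": 4}
--     incomp_scores = []
--     for remain in incomplete:
--         temp_score = 0
--         for char in remain[::-1]:
--             temp_score *= 5
--             temp_score += points[matches[char]]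
--         incomp_scores.append(temp_score)
--     incomp_scores = list(sorted(incomp_scores))
--
--     return incomp_scores[len(incomp_scores) // 2]
-- ===== SOURCE B (Python) =====
-- def syntax_scoring(chunks):
--     # The stack is replaced by a single base-5 integer n (most significant digit =
--     # innermost open group) plus p = 5**depth; the completion score of an
--     # incomplete line is then n itself, read off with no second pass.
--     val = {"(": 1, "[": 2, "{": 3, "<": 4}
--     need = {")": 1, "]": 2, "}": 3, ">": 4}
--     scores = []
--     for chunk in chunks:
--         n, p, ok = 0, 1, True
--         for ch in chunk:
--             if ch in val:
--                 n += val[ch] * p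
--                 p *= 5
--             else:
--                 p //= 5
--                 top = n // p
--                 n -= top * p
--                 if top != need[ch]:
--                     ok = False
--         if ok:
--             scores.append(n)
--     scores.sort()
--     return scores[len(scores) // 2]
-- ===== Notes on version B (the rewrite author's own statement) =====
-- stated objective: alternative
-- what changed: B replaces the explicit list stack and the separate reverse-scoring pass over leftover stacks by a base-5 integer encoding of the pending open groups (n = would-be completion score, p = 5**depth), so pushes/pops are arithmetic and an incomplete line's score is read off as n directly with no second phase.
import Mathlib
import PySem

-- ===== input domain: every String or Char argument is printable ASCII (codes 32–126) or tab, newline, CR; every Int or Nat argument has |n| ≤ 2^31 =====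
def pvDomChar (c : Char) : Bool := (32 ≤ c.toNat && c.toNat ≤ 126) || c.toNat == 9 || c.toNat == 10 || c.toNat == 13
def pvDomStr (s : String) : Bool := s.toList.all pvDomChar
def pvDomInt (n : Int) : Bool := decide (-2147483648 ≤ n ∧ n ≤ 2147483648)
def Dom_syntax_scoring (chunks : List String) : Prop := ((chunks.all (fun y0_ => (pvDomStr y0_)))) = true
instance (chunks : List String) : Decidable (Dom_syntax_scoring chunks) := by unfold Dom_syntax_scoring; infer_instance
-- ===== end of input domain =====

-- ===== PORT A =====
-- B replaces the list stack and the reverse scoring pass by a base-5 integer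
-- accumulator (the pending open groups as digits), from which an incomplete
-- line's completion score is read off directly; objective: alternative.
def pvOpenA : List Char := ['(', '[', '{', '<']
def pvMatchesA : PySem.Dict Char Char := PySem.Dict.ofList [('(', ')'), ('[', ']'), ('{', '}'), ('<', '>')]
def pvPoints1A : PySem.Dict Char Int := PySem.Dict.ofList [(')', 3), (']', 57), ('}', 1197), ('>', 25137)]
def pvPoints2A : PySem.Dict Char Int := PySem.Dict.ofList [(')', 1), (']', 2), ('}', 3), ('>', 4)]

-- one char of A's part-1 inner loop; state = (chars, corrupt, corrupt_score).
-- chars.pop() on an empty stack (IndexError) and points[char] on a non-bracket char (KeyError)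
-- are excluded by Pre_; the getD defaults are never reached there.
def pvStepA (st : List Char × Bool × Int) (char : Char) : List Char × Bool × Int :=
  if pvOpenA.contains char then (st.1 ++ [char], st.2.1, st.2.2)
  else
    let check := (st.1.getLast?).getD ' '
    let chars := st.1.dropLast
    if pvMatchesA.getD check ' ' ≠ char then (chars, true, st.2.2 + pvPoints1A.getD char 0)
    else (chars, st.2.1, st.2.2)

-- one chunk of A's part-1 outer loop; accumulates (incomplete, corrupt_score)
def pvChunkA (acc : List (List Char) × Int) (chunk : String) : List (List Char) × Int :=
  let r := chunk.toList.foldl pvStepA ([], false, acc.2)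
  if r.2.1 then (acc.1, r.2.2) else (acc.1 ++ [r.1], r.2.2)

-- A's part-2 score of one incomplete line (remain[::-1] = remain.reverse)
def pvCompA (remain : List Char) : Int :=
  remain.reverse.foldl (fun t char => t * 5 + pvPoints2A.getD (pvMatchesA.getD char ' ') 0) 0

def syntax_scoring (chunks : List String) : Int :=
  let p := chunks.foldl pvChunkA ([], 0)
  let incompScores := PySem.List.sorted (p.1.map pvCompA) (fun x => x) false
  -- incomp_scores[len // 2]; IndexError on the empty list is excluded by Pre_
  (incompScores[incompScores.length / 2]?).getD 0

-- ===== PORT B =====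
def pvValB : PySem.Dict Char Int := PySem.Dict.ofList [('(', 1), ('[', 2), ('{', 3), ('<', 4)]
def pvNeedB : PySem.Dict Char Int := PySem.Dict.ofList [(')', 1), (']', 2), ('}', 3), ('>', 4)]

-- one char of B's loop; state = (n, p, ok).
-- Python raises on n // 0 (over-popping, p hits 0) and on need[ch] for a
-- non-bracket char; both lie outside Pre_, where the total floordiv/getD defaults
-- are never reached.
def pvStepB (st : Int × Int × Bool) (ch : Char) : Int × Int × Bool :=
  if (pvValB.get? ch).isSome then
    (st.1 + pvValB.getD ch 0 * st.2.1, st.2.1 * 5, st.2.2)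
  else
    let p := PySem.Int.floordiv st.2.1 5
    let top := PySem.Int.floordiv st.1 p
    let n := st.1 - top * p
    (n, p, if top ≠ pvNeedB.getD ch 0 then false else st.2.2)

def pvChunkB (scores : List Int) (chunk : String) : List Int :=
  let r := chunk.toList.foldl pvStepB (0, 1, true)
  if r.2.2 then scores ++ [r.1] else scores

def syntax_scoring_alt (chunks : List String) : Int :=
  let scores := PySem.List.sorted (chunks.foldl pvChunkB []) (fun x => x) false
  (scores[scores.length / 2]?).getD 0

-- ===== PRECONDITION & SPEC =====
def pvIsOpen (c : Char) : Bool := c == '(' || c == '[' || c == '{' || c == '<'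
def pvIsClose (c : Char) : Bool := c == ')' || c == ']' || c == '}' || c == '>'
def pvPairOf (c : Char) : Char :=
  if c = '(' then ')' else if c = '[' then ']' else if c = '{' then '}' else '>'

-- semantic bracket scan of one chunk (stack held top-first): none exactly where A raises
-- (pop from an empty stack = IndexError, a non-bracket closing char = KeyError);
-- some corrupt otherwise, with corrupt = the chunk is corrupted.
def pvScan : List Char → List Char → Bool → Option Bool
  | [], _, corrupt => some corrupt
  | c :: cs, rs, corrupt =>
    if pvIsOpen c then pvScan cs (c :: rs) corrupt
    else
      match rs with
      | [] => none
      | t :: rest => if pvIsClose c then pvScan cs rest (corrupt || (pvPairOf t != c)) else none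

-- Pre_ = exactly the inputs where the Python A returns: every chunk scans without raising,
-- and at least one chunk is not corrupted (else the final indexing raises IndexError).
def Pre_syntax_scoring (chunks : List String) : Prop :=
  chunks.all (fun s => (pvScan s.toList [] false).isSome) = true ∧
  chunks.any (fun s => pvScan s.toList [] false == some false) = true
instance (chunks : List String) : Decidable (Pre_syntax_scoring chunks) := by
  unfold Pre_syntax_scoring; infer_instance

def pvWitness_syntax_scoring : List String := ["([{<>}])", "(("]

def Spec_syntax_scoring (chunks : List String) (out : Int) : Prop := out = syntax_scoring_alt chunks
instance (chunks : List String) (out : Int) : Decidable (Spec_syntax_scoring chunks out) := by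
  unfold Spec_syntax_scoring; infer_instance

-- ===== CLAIM (what is proved, stated in full; the proofs are below) =====
def Claim_equal_syntax_scoring : Prop := ∀ (chunks : List String), Dom_syntax_scoring chunks → Pre_syntax_scoring chunks → Spec_syntax_scoring chunks (syntax_scoring chunks)

-- ===== LEMMAS AND PROOFS =====

-- the base-5 encoding of a pending stack (top-first list): B's invariant value n
def pvH (l : List Char) : Int := l.foldl (fun t c => t * 5 + pvValB.getD c 0) 0

lemma open_cases {c : Char} (h : pvIsOpen c = true) : c = '(' ∨ c = '[' ∨ c = '{' ∨ c = '<' := by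
  rcases (by simpa [pvIsOpen] using h : ((c = '(' ∨ c = '[') ∨ c = '{') ∨ c = '<') with ((h|h)|h)|h <;> tauto

lemma close_cases {c : Char} (h : pvIsClose c = true) : c = ')' ∨ c = ']' ∨ c = '}' ∨ c = '>' := by
  rcases (by simpa [pvIsClose] using h : ((c = ')' ∨ c = ']') ∨ c = '}') ∨ c = '>') with ((h|h)|h)|h <;> tauto

-- bracket-classification facts bridging the scans (proved by cases on the char)
lemma mem_open {c : Char} (h : pvIsOpen c = true) : c ∈ pvOpenA := by
  rcases open_cases h with h|h|h|h <;> subst h <;> decide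

lemma not_mem_open {c : Char} (h : pvIsClose c = true) : c ∉ pvOpenA := by
  rcases close_cases h with h|h|h|h <;> subst h <;> decide

lemma valB_open {c : Char} (h : pvIsOpen c = true) : (pvValB.get? c).isSome = true := by
  rcases open_cases h with h|h|h|h <;> subst h <;> decide

lemma valB_close {c : Char} (h : pvIsClose c = true) : (pvValB.get? c).isSome = false := by
  rcases close_cases h with h|h|h|h <;> subst h <;> decide

lemma valB_bounds {c : Char} (h : pvIsOpen c = true) : 1 ≤ pvValB.getD c 0 ∧ pvValB.getD c 0 ≤ 4 := by
  rcases open_cases h with h|h|h|h <;> subst h <;> decide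

lemma matchesA_open {t : Char} (h : pvIsOpen t = true) : pvMatchesA.getD t ' ' = pvPairOf t := by
  rcases open_cases h with h|h|h|h <;> subst h <;> decide

lemma mismatch_iff {t c : Char} (ht : pvIsOpen t = true) (hc : pvIsClose c = true) :
    pvMatchesA.getD t ' ' = c ↔ pvValB.getD t 0 = pvNeedB.getD c 0 := by
  rcases open_cases ht with h1|h1|h1|h1 <;> rcases close_cases hc with h2|h2|h2|h2 <;>
    subst h1 <;> subst h2 <;> decide

-- Horner facts about the encoding
lemma foldl_horner (l : List Char) : ∀ (a : Int),
    l.foldl (fun t c => t * 5 + pvValB.getD c 0) a = a * 5 ^ l.length + pvH l := by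
  induction l with
  | nil => intro a; simp [pvH]
  | cons c l ih =>
    intro a
    simp only [List.foldl_cons, List.length_cons, pvH] at *
    rw [ih (a * 5 + pvValB.getD c 0), ih (0 * 5 + pvValB.getD c 0)]
    ring

lemma pvH_cons (c : Char) (l : List Char) :
    pvH (c :: l) = pvValB.getD c 0 * 5 ^ l.length + pvH l := by
  have := foldl_horner l (0 * 5 + pvValB.getD c 0)
  simpa [pvH] using this

lemma pvH_bounds : ∀ (l : List Char), l.all pvIsOpen = true →
    0 ≤ pvH l ∧ pvH l < 5 ^ l.length := by
  intro l
  induction l with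
  | nil => intro _; simp [pvH]
  | cons c l ih =>
    intro h
    simp only [List.all_cons, Bool.and_eq_true] at h
    obtain ⟨h0, h1⟩ := ih h.2
    obtain ⟨v1, v4⟩ := valB_bounds h.1
    have hp : (0:Int) < 5 ^ l.length := by positivity
    rw [pvH_cons, List.length_cons, pow_succ]
    constructor
    · nlinarith
    · nlinarith

-- B's step on an opener pushes a digit
lemma stepB_open {c : Char} (h : pvIsOpen c = true) (rs : List Char) (ok : Bool) :
    pvStepB (pvH rs, 5 ^ rs.length, ok) c = (pvH (c :: rs), 5 ^ (c :: rs).length, ok) := by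
  simp only [pvStepB, valB_open h, if_true, pvH_cons, List.length_cons, pow_succ]
  rw [Int.add_comm]

-- B's step on a closer pops the top digit and compares it
lemma stepB_close {t c : Char} (ht : pvIsOpen t = true) (hc : pvIsClose c = true)
    (l : List Char) (hall : l.all pvIsOpen = true) (ok : Bool) :
    pvStepB (pvH (t :: l), 5 ^ (t :: l).length, ok) c
      = (pvH l, 5 ^ l.length, if pvMatchesA.getD t ' ' ≠ c then false else ok) := by
  obtain ⟨h0, h1⟩ := pvH_bounds l hall
  obtain ⟨v1, v4⟩ := valB_bounds ht
  have hp : (0:Int) < 5 ^ l.length := by positivity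
  have hdiv : PySem.Int.floordiv ((5:Int) ^ (t :: l).length) 5 = 5 ^ l.length := by
    rw [PySem.Int.floordiv_eq_iff_of_pos (by norm_num)]
    rw [List.length_cons, pow_succ]
    constructor
    · linarith
    · nlinarith
  have htop : PySem.Int.floordiv (pvH (t :: l)) ((5:Int) ^ l.length) = pvValB.getD t 0 := by
    rw [PySem.Int.floordiv_eq_iff_of_pos hp, pvH_cons]
    constructor
    · linarith
    · nlinarith
  have hval : pvH (t :: l) - pvValB.getD t 0 * 5 ^ l.length = pvH l := by
    rw [pvH_cons]; ring
  have hcmp : (pvValB.getD t 0 ≠ pvNeedB.getD c 0) = (pvMatchesA.getD t ' ' ≠ c) := by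
    by_cases hm : pvMatchesA.getD t ' ' = c
    · simp [hm, (mismatch_iff ht hc).mp hm]
    · simp only [eq_iff_iff]
      constructor
      · intro _; exact hm
      · intro _ hv; exact hm ((mismatch_iff ht hc).mpr hv)
  simp only [pvStepB, valB_close hc, Bool.false_eq_true, if_false, hdiv, htop, hval, hcmp]

-- per-chunk loop equivalence: A's fold, B's fold and pvScan march in lock step
lemma scan_fold (cs : List Char) : ∀ (rs : List Char) (corrupt : Bool) (s : Int),
    (pvScan cs rs corrupt).isSome = true →
    rs.all pvIsOpen = true →
    ∃ (rs' : List Char) (c' : Bool) (s' : Int),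
      pvScan cs rs corrupt = some c' ∧
      cs.foldl pvStepA (rs.reverse, corrupt, s) = (rs'.reverse, c', s') ∧
      cs.foldl pvStepB (pvH rs, 5 ^ rs.length, !corrupt) = (pvH rs', 5 ^ rs'.length, !c') ∧
      rs'.all pvIsOpen = true := by
  induction cs with
  | nil =>
    intro rs corrupt s _ hall
    exact ⟨rs, corrupt, s, rfl, rfl, rfl, hall⟩
  | cons c cs ih =>
    intro rs corrupt s hsome hall
    by_cases hc : pvIsOpen c = true
    · -- opening bracket: both programs push, pvScan pushes
      have hscan : pvScan (c :: cs) rs corrupt = pvScan cs (c :: rs) corrupt := by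
        simp [pvScan, hc]
      have hA : pvStepA (rs.reverse, corrupt, s) c = ((c :: rs).reverse, corrupt, s) := by
        simp [pvStepA, mem_open hc]
      rw [hscan] at hsome
      obtain ⟨rs', c', s', h1, h2, h3, h4⟩ := ih (c :: rs) corrupt s hsome
        (by simp only [List.all_cons, hc, hall, Bool.and_self])
      exact ⟨rs', c', s', hscan.trans h1,
        by simpa only [List.foldl_cons, hA] using h2,
        by simpa only [List.foldl_cons, stepB_open hc rs (!corrupt)] using h3, h4⟩
    · -- not an opening bracket: pvScan demands a nonempty stack and a real closer
      match rs, hall with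
      | [], _ => simp [pvScan, hc] at hsome
      | t :: rest, hall =>
        have ht : pvIsOpen t = true := by
          simp only [List.all_cons, Bool.and_eq_true] at hall; exact hall.1
        have hrest : rest.all pvIsOpen = true := by
          simp only [List.all_cons, Bool.and_eq_true] at hall; exact hall.2
        by_cases hcl : pvIsClose c = true
        · have hscan : pvScan (c :: cs) (t :: rest) corrupt
              = pvScan cs rest (corrupt || (pvPairOf t != c)) := by
            simp [pvScan, hc, hcl]
          have hB := stepB_close ht hcl rest hrest (!corrupt)
          by_cases hm : pvMatchesA.getD t ' ' = c
          · -- matching closer: pop, flags unchanged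
            have hA : pvStepA ((t :: rest).reverse, corrupt, s) c = (rest.reverse, corrupt, s) := by
              simp [pvStepA, not_mem_open hcl, hm]
            have hm' : pvPairOf t = c := by rw [← matchesA_open ht]; exact hm
            have hcor : (corrupt || (pvPairOf t != c)) = corrupt := by simp [hm']
            rw [hscan, hcor] at hsome
            obtain ⟨rs', c', s', h1, h2, h3, h4⟩ := ih rest corrupt s hsome hrest
            refine ⟨rs', c', s', by rw [hscan, hcor, h1],
              by simpa only [List.foldl_cons, hA] using h2, ?_, h4⟩
            rw [List.foldl_cons, hB]
            simpa only [hm, ne_eq, not_true_eq_false, if_false] using h3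
          · -- mismatching closer: pop, mark corrupt
            have hA : pvStepA ((t :: rest).reverse, corrupt, s) c
                = (rest.reverse, true, s + pvPoints1A.getD c 0) := by
              simp [pvStepA, not_mem_open hcl, hm]
            have hm' : pvPairOf t ≠ c := by rw [← matchesA_open ht]; exact hm
            have hcor : (corrupt || (pvPairOf t != c)) = true := by simp [bne, hm']
            rw [hscan, hcor] at hsome
            obtain ⟨rs', c', s', h1, h2, h3, h4⟩ := ih rest true (s + pvPoints1A.getD c 0) hsome hrest
            refine ⟨rs', c', s', by rw [hscan, hcor, h1],
              by simpa only [List.foldl_cons, hA] using h2, ?_, h4⟩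
            rw [List.foldl_cons, hB]
            simpa only [hm, ne_eq, not_false_eq_true, if_true, Bool.not_true] using h3
        · simp [pvScan, hc, hcl] at hsome

lemma comp_step {c : Char} (h : pvIsOpen c = true) :
    pvPoints2A.getD (pvMatchesA.getD c ' ') 0 = pvValB.getD c 0 := by
  rcases open_cases h with h|h|h|h <;> subst h <;> decide

lemma comp_fold : ∀ (l : List Char) (t : Int), l.all pvIsOpen = true →
    l.foldl (fun t char => t * 5 + pvPoints2A.getD (pvMatchesA.getD char ' ') 0) t
      = l.foldl (fun t c => t * 5 + pvValB.getD c 0) t := by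
  intro l
  induction l with
  | nil => intro t _; rfl
  | cons c l ih =>
    intro t h
    simp only [List.all_cons, Bool.and_eq_true] at h
    simp only [List.foldl_cons, comp_step h.1, ih _ h.2]

-- A's reverse-pass score of a leftover stack is exactly B's accumulator value
lemma comp_eq {rs : List Char} (h : rs.all pvIsOpen = true) :
    pvCompA rs.reverse = pvH rs := by
  unfold pvCompA pvH
  rw [List.reverse_reverse]
  exact comp_fold rs 0 h

-- outer loops: A's incomplete stacks mapped through pvCompA = B's score list
lemma outer_eq (chunks : List String) : ∀ (accA : List (List Char)) (s : Int),
    chunks.all (fun s => (pvScan s.toList [] false).isSome) = true →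
    ((chunks.foldl pvChunkA (accA, s)).1).map pvCompA = chunks.foldl pvChunkB (accA.map pvCompA) := by
  induction chunks with
  | nil => intro accA s _; rfl
  | cons chunk chunks ih =>
    intro accA s hall
    simp only [List.all_cons, Bool.and_eq_true] at hall
    obtain ⟨rs', c', s', h1, h2, h3, h4⟩ := scan_fold chunk.toList [] false s hall.1 rfl
    simp only [List.foldl_cons]
    rw [show pvChunkA (accA, s) chunk = (if c' then accA else accA ++ [rs'.reverse], s') by
          simp only [pvChunkA]; rw [show (([], false, s) : List Char × Bool × Int) = (List.reverse [], false, s) from rfl, h2]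
          cases c' <;> rfl,
        show pvChunkB (accA.map pvCompA) chunk
            = (if c' then accA.map pvCompA else accA.map pvCompA ++ [pvH rs']) by
          simp only [pvChunkB]
          rw [show ((0, 1, true) : Int × Int × Bool) = (pvH [], 5 ^ ([] : List Char).length, !false) from rfl, h3]
          cases c' <;> rfl]
    cases c' with
    | true => exact ih accA s' hall.2
    | false =>
      have h5 := ih (accA ++ [rs'.reverse]) s' hall.2
      simpa only [if_false, List.map_append, List.map_cons, List.map_nil, comp_eq h4] using h5

-- ===== VERDICT (by name: the statement is the Claim_ definition above) =====
theorem syntax_scoring_spec : Claim_equal_syntax_scoring := by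
  intro chunks _ hpre
  unfold Spec_syntax_scoring syntax_scoring syntax_scoring_alt
  have h := outer_eq chunks [] 0 hpre.1
  simp only [List.map_nil] at h
  simp only [h]
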